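-- pv_equiv track=rewrite | github.com/amoogler/leetcode-python | Basics/293.py | generatePossibleNextMoves
-- ===== SOURCE A (Python) =====
-- from typing import List
--
-- def generatePossibleNextMoves(currentState: str) -> List[str]:
--     res, N = [], len(currentState)
--
--     if N < 2:
--         return res
--
--     for i in range(1, N):
--         if currentState[i] == '+' and currentState[i - 1] == '+':
--             state = list(currentState)
--             state[i] = '-'
--             state[i - 1] = '-'
--             res.append(''.join(state))
--
--     return res
-- ===== SOURCE B (Python) =====
-- def generatePossibleNextMoves(currentState: str):
--     # Stage 1: run-length encode the string into maximal runs [char, length].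
--     runs = []
--     for c in currentState:
--         if runs and runs[-1][0] == c:
--             runs[-1][1] += 1
--         else:
--             runs.append([c, 1])
--     # Stage 2: a maximal '+'-run of length L contributes L-1 moves; rebuild each
--     # result from the run decomposition instead of re-testing characters.
--     res = []
--     pos = 0
--     for c, L in runs:
--         if c == '+':
--             pre = currentState[:pos]
--             suf = currentState[pos + L:]
--             for j in range(L - 1):
--                 res.append(pre + '+' * j + '--' + '+' * (L - j - 2) + suf)
--         pos += L
--     return res
-- ===== Notes on version B (the rewrite author's own statement) =====
-- stated objective: alternative
-- what changed: replaces A's per-index adjacent-pair scan (with a list copy, two element sets and a join per hit) by a two-stage algorithm: first run-length encode the string into maximal runs, then emit L-1 results per maximal plus-run of length L, rebuilding each result from the run decomposition (prefix, j plus signs, two minus signs, L-j-2 plus signs, suffix)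
import Mathlib
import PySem

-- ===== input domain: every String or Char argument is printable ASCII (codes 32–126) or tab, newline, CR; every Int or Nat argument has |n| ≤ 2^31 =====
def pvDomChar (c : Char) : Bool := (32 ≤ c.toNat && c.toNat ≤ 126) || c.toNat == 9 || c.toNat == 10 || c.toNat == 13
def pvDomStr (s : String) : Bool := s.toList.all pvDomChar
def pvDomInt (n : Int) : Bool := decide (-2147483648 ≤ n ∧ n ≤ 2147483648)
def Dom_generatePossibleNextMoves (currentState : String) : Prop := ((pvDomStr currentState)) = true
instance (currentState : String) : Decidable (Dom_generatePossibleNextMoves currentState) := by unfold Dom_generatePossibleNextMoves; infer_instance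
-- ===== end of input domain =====

-- B replaces A's per-index pair test (a list-copy/set/join per hit) by a two-stage
-- algorithm: run-length encode the string, then emit L-1 results per maximal
-- '+'-run of length L, rebuilding each result from the run decomposition
-- (objective: alternative algorithm / data structure).

-- ===== PORT A =====
-- Port of A: index loop over range(1, N); s[i] read via pyGetD (index always in range here);
-- list(currentState)/state[i]='-' /''.join(state) ported as toList / List.set / String.ofList.
def generatePossibleNextMoves (currentState : String) : List String :=
  let cs := currentState.toList
  let N : Int := PySem.Str.len currentState
  if N < 2 then []
  else
    (PySem.List.pyRange 1 N).foldl (fun res i =>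
      if PySem.List.pyGetD cs i ' ' = '+' ∧ PySem.List.pyGetD cs (i - 1) ' ' = '+' then
        res ++ [String.ofList ((cs.set i.toNat '-').set (i - 1).toNat '-')]
      else res) []

-- ===== PORT B =====
-- Port of B stage 1: the loop body of the run-length encoder ('runs and runs[-1][0]==c'
-- tested via getLast?; runs[-1][1] += 1 ported as dropLast ++ updated last).
def rleStep (runs : List (Char × Int)) (c : Char) : List (Char × Int) :=
  match runs.getLast? with
  | some (c0, n) => if c0 = c then runs.dropLast ++ [(c0, n + 1)] else runs ++ [(c, 1)]
  | none => runs ++ [(c, 1)]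

-- Port of B stage 2's loop body: state = (res, pos); '+'*j ported as
-- PySem.List.pyRepeat ['+'] j (Python sequence repetition, clamps negatives).
def stage2Step (cs : List Char) (st : List String × Int) (cl : Char × Int) : List String × Int :=
  let res := st.1; let pos := st.2
  let c := cl.1; let L := cl.2
  (if c = '+' then
     let pre := PySem.List.slice cs none (some pos)
     let suf := PySem.List.slice cs (some (pos + L)) none
     (PySem.List.pyRange 0 (L - 1)).foldl (fun r j =>
       r ++ [String.ofList (pre ++ PySem.List.pyRepeat ['+'] j ++ '-' :: '-' ::
         PySem.List.pyRepeat ['+'] (L - j - 2) ++ suf)]) res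
   else res, pos + L)

def generatePossibleNextMoves_alt (currentState : String) : List String :=
  let cs := currentState.toList
  let runs := cs.foldl rleStep []
  (runs.foldl (stage2Step cs) ([], 0)).1

-- ===== PRECONDITION & SPEC =====
def Spec_generatePossibleNextMoves (currentState : String) (out : List String) : Prop := out = generatePossibleNextMoves_alt currentState
instance (currentState : String) (out : List String) : Decidable (Spec_generatePossibleNextMoves currentState out) := by unfold Spec_generatePossibleNextMoves; infer_instance

-- ===== CLAIM (what is proved, stated in full; the proofs are below) =====
def Claim_equal_generatePossibleNextMoves : Prop := ∀ (currentState : String), Dom_generatePossibleNextMoves currentState → Spec_generatePossibleNextMoves currentState (generatePossibleNextMoves currentState)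

-- ===== LEMMAS AND PROOFS =====

-- Common specification both ports are reduced to: flip each adjacent '++' pair, left to right.
def goodIdx (cs : List Char) (j : Nat) : Bool := (cs[j]? == some '+') && (cs[j+1]? == some '+')

def emitAt (cs : List Char) (j : Nat) : String :=
  String.ofList (cs.take j ++ '-' :: '-' :: cs.drop (j + 2))

def pairsSpec (cs : List Char) : List String :=
  ((List.range cs.length).filter (goodIdx cs)).map (emitAt cs)

-- ---- A side ----

lemma set_set_eq (cs : List Char) (k : Nat) (h : k + 1 < cs.length) :
    (cs.set (k + 1) '-').set k '-' = cs.take k ++ '-' :: '-' :: cs.drop (k + 2) := by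
  have hA : cs.set (k + 1) '-' = List.take (k+1) cs ++ '-' :: List.drop (k + 1 + 1) cs := by
    rw [List.set_eq_take_append_cons_drop, if_pos h]
  rw [hA, List.set_eq_take_append_cons_drop, if_pos (by simp; omega)]
  have ht : List.take k (List.take (k+1) cs ++ ('-' :: List.drop (k + 1 + 1) cs))
      = List.take k cs := by
    rw [List.take_append_of_le_length (by simp; omega), List.take_take]
    congr 1
    omega
  have hd : List.drop (k+1) (List.take (k+1) cs ++ ('-' :: List.drop (k + 1 + 1) cs))
      = '-' :: List.drop (k + 2) cs := by
    rw [List.drop_left' (by simp; omega)]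
  rw [ht, hd]

lemma cond_getElem (cs : List Char) (j : Nat) (hj : j + 1 < cs.length) :
    (PySem.List.pyGetD cs ((j : Int) + 1) ' ' = '+' ∧
      PySem.List.pyGetD cs ((j : Int) + 1 - 1) ' ' = '+')
    ↔ (cs[j+1] = '+' ∧ cs[j] = '+') := by
  have hg1 : PySem.List.pyGetD cs ((j : Int) + 1) ' ' = cs[j+1] := by
    rw [show ((j : Int) + 1) = ((j + 1 : Nat) : Int) by norm_cast]
    rw [PySem.List.pyGetD_eq_getElem cs ' ' (by positivity) (by exact_mod_cast hj)]
    simp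
  have hg0 : PySem.List.pyGetD cs ((j : Int) + 1 - 1) ' ' = cs[j] := by
    rw [show ((j : Int) + 1 - 1) = ((j : Nat) : Int) by ring]
    rw [PySem.List.pyGetD_eq_getElem cs ' ' (by positivity)
      (by exact_mod_cast (by omega : j < cs.length))]
    simp
  rw [hg1, hg0]

lemma goodIdx_true (cs : List Char) (k : Nat) (hk : k + 1 < cs.length)
    (h : cs[k+1] = '+' ∧ cs[k] = '+') : goodIdx cs k = true := by
  unfold goodIdx
  rw [List.getElem?_eq_getElem (by omega), List.getElem?_eq_getElem hk, h.1, h.2]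
  simp

lemma goodIdx_false (cs : List Char) (k : Nat) (hk : k + 1 < cs.length)
    (h : ¬ (cs[k+1] = '+' ∧ cs[k] = '+')) : goodIdx cs k = false := by
  unfold goodIdx
  rw [List.getElem?_eq_getElem (by omega), List.getElem?_eq_getElem hk]
  by_cases h1 : cs[k] = '+'
  · by_cases h2 : cs[k+1] = '+'
    · exact absurd ⟨h2, h1⟩ h
    · simp [h2]
  · simp [h1]

lemma lemA_loop (cs : List Char) (m : Nat) : ∀ (k : Nat) (acc : List String),
    k + m + 1 = cs.length →
    (PySem.List.pyRange ((k : Int) + 1) (cs.length : Int)).foldl (fun res i =>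
        if PySem.List.pyGetD cs i ' ' = '+' ∧ PySem.List.pyGetD cs (i - 1) ' ' = '+' then
          res ++ [String.ofList ((cs.set i.toNat '-').set (i - 1).toNat '-')]
        else res) acc
      = acc ++ ((List.range' k m).filter (goodIdx cs)).map (emitAt cs) := by
  induction m with
  | zero =>
    intro k acc hk
    rw [PySem.List.pyRange_one_eq_nil (by omega)]
    simp
  | succ m ih =>
    intro k acc hk
    have hklen : k + 1 < cs.length := by omega
    rw [PySem.List.pyRange_one_cons (by omega)]
    rw [List.foldl_cons]
    have hrange : List.range' k (m + 1) = k :: List.range' (k+1) m := List.range'_succ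
    by_cases hg : cs[k+1] = '+' ∧ cs[k] = '+'
    · rw [if_pos ((cond_getElem cs k hklen).mpr hg)]
      have ht1 : ((k : Int) + 1).toNat = k + 1 := by omega
      have ht0 : ((k : Int) + 1 - 1).toNat = k := by omega
      rw [ht1, ht0, set_set_eq cs k hklen]
      rw [show ((k : Int) + 1 + 1) = ((k + 1 : Nat) : Int) + 1 by push_cast; ring]
      rw [ih (k+1) _ (by omega)]
      rw [hrange, List.filter_cons_of_pos (goodIdx_true cs k hklen hg), List.map_cons]
      simp [emitAt]
    · rw [if_neg (fun hc => hg ((cond_getElem cs k hklen).mp hc))]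
      rw [show ((k : Int) + 1 + 1) = ((k + 1 : Nat) : Int) + 1 by push_cast; ring]
      rw [ih (k+1) _ (by omega)]
      rw [hrange, List.filter_cons_of_neg (by simp [goodIdx_false cs k hklen hg])]

lemma A_eq_spec (s : String) : generatePossibleNextMoves s = pairsSpec s.toList := by
  unfold generatePossibleNextMoves
  simp only [PySem.Str.len_eq]
  by_cases h2 : ((s.toList.length : Int)) < 2
  · rw [if_pos h2]
    have hl2 : s.toList.length < 2 := by exact_mod_cast h2
    rcases hl : s.toList with _ | ⟨a, _ | ⟨b, t⟩⟩
    · simp [pairsSpec]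
    · simp [pairsSpec, List.range_succ, goodIdx]
    · rw [hl] at hl2; simp at hl2
  · rw [if_neg h2]
    have hl2 : 2 ≤ s.toList.length := by omega
    have hA := lemA_loop s.toList (s.toList.length - 1) 0 [] (by omega)
    simp only [Nat.cast_zero, zero_add] at hA
    rw [hA]
    unfold pairsSpec
    have hsl : s.toList.length = s.length := by simp
    have hsplit : List.range s.toList.length
        = List.range' 0 (s.toList.length - 1) ++ [s.toList.length - 1] := by
      rw [List.range_eq_range']
      have h1 := @List.range'_append 0 (s.toList.length - 1) 1 1
      simp only [one_mul, Nat.zero_add, List.range'_one] at h1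
      conv_lhs => rw [show s.toList.length = (s.toList.length - 1) + 1 by omega]
      rw [← h1]
    rw [hsplit, List.filter_append]
    have hlast : (goodIdx s.toList (s.length - 1)) = false := by
      unfold goodIdx
      rw [List.getElem?_eq_none (by omega : s.toList.length ≤ s.length - 1 + 1)]
      simp
    simp [hlast]

-- ---- B side ----

def runsToList (rs : List (Char × Int)) : List Char :=
  rs.flatMap (fun p => List.replicate p.2.toNat p.1)

-- recursive characterisation of B's run-length-encoding fold
def rleF (c : Char) (n : Int) : List Char → List (Char × Int)
  | [] => [(c, n)]
  | d :: t => if c = d then rleF c (n + 1) t else (c, n) :: rleF d 1 t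

lemma fold_rle (l : List Char) : ∀ (rs : List (Char × Int)) (c : Char) (n : Int),
    List.foldl rleStep (rs ++ [(c, n)]) l = rs ++ rleF c n l := by
  induction l with
  | nil => intro rs c n; simp [rleF]
  | cons d t ih =>
    intro rs c n
    rw [List.foldl_cons]
    by_cases h : c = d
    · have hstep : rleStep (rs ++ [(c, n)]) d = rs ++ [(c, n + 1)] := by
        simp [rleStep, h]
      rw [hstep, ih, rleF, if_pos h]
    · have hstep : rleStep (rs ++ [(c, n)]) d = (rs ++ [(c, n)]) ++ [(d, 1)] := by
        simp [rleStep, h]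
      rw [hstep, ih, rleF, if_neg h]
      simp

lemma rle_eq (d : Char) (t : List Char) :
    List.foldl rleStep [] (d :: t) = rleF d 1 t := by
  rw [List.foldl_cons]
  have hstep : rleStep [] d = [] ++ [(d, 1)] := by simp [rleStep]
  rw [hstep, fold_rle]
  simp

lemma rleF_flat (t : List Char) : ∀ (c : Char) (n : Int), 0 ≤ n →
    runsToList (rleF c n t) = List.replicate n.toNat c ++ t := by
  induction t with
  | nil => intro c n _; simp [rleF, runsToList]
  | cons d t ih =>
    intro c n hn
    by_cases h : c = d
    · rw [rleF, if_pos h, ih c (n+1) (by omega)]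
      have : (n + 1).toNat = n.toNat + 1 := by omega
      rw [this, List.replicate_succ']
      subst h
      simp
    · rw [rleF, if_neg h]
      show List.replicate n.toNat c ++ runsToList (rleF d 1 t) = _
      rw [ih d 1 (by omega)]
      simp

lemma rleF_head_fst (t : List Char) : ∀ (c : Char) (n : Int),
    ((rleF c n t).head?.map Prod.fst) = some c := by
  induction t with
  | nil => intro c n; simp [rleF]
  | cons d t ih =>
    intro c n
    by_cases h : c = d
    · rw [rleF, if_pos h]; exact ih c (n+1)
    · rw [rleF, if_neg h]; simp

lemma rleF_pos (t : List Char) : ∀ (c : Char) (n : Int), 1 ≤ n →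
    ∀ p ∈ rleF c n t, 1 ≤ p.2 := by
  induction t with
  | nil => intro c n hn p hp; simp [rleF] at hp; subst hp; exact hn
  | cons d t ih =>
    intro c n hn p hp
    by_cases h : c = d
    · rw [rleF, if_pos h] at hp
      exact ih c (n+1) (by omega) p hp
    · rw [rleF, if_neg h] at hp
      rcases List.mem_cons.mp hp with h1 | h1
      · subst h1; exact hn
      · exact ih d 1 (by omega) p h1

lemma rleF_chain (t : List Char) : ∀ (c : Char) (n : Int),
    List.IsChain (fun p q : Char × Int => p.1 ≠ q.1) (rleF c n t) := by
  induction t with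
  | nil => intro c n; simp [rleF]
  | cons d t ih =>
    intro c n
    by_cases h : c = d
    · rw [rleF, if_pos h]; exact ih c (n+1)
    · rw [rleF, if_neg h]
      rw [List.isChain_cons]
      refine ⟨?_, ih d 1⟩
      intro q hq
      have := rleF_head_fst t d 1
      rw [hq] at this
      simp at this
      simp [this, h]

lemma runsToList_head (rs : List (Char × Int)) (h : ∀ p ∈ rs, 1 ≤ p.2) :
    (runsToList rs).head? = rs.head?.map Prod.fst := by
  cases rs with
  | nil => simp [runsToList]
  | cons p rest =>
    obtain ⟨d, k⟩ := p
    have hk : 1 ≤ k := h (d, k) (by simp)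
    obtain ⟨k', hk'⟩ : ∃ k', k.toNat = k' + 1 := ⟨k.toNat - 1, by omega⟩
    simp [runsToList, hk', List.replicate_succ]

lemma lemB_loop (cs : List Char) : ∀ (rs : List (Char × Int)) (pos : Nat) (res : List String),
    pos ≤ cs.length →
    List.drop pos cs = runsToList rs →
    (∀ p ∈ rs, 1 ≤ p.2) →
    List.IsChain (fun p q : Char × Int => p.1 ≠ q.1) rs →
    (rs.foldl (stage2Step cs) (res, (pos : Int))).1
      = res ++ ((List.range' pos (cs.length - pos)).filter (goodIdx cs)).map (emitAt cs) := by
  intro rs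
  induction rs with
  | nil =>
    intro pos res hpos hdrop _ _
    have h0 : cs.length - pos = 0 := by
      have := congrArg List.length hdrop
      simp [runsToList] at this
      omega
    simp [h0]
  | cons p rest ih =>
    obtain ⟨c, L⟩ := p
    intro pos res hpos hdrop hcnt hchain
    have hL : 1 ≤ L := hcnt (c, L) (by simp)
    have hLm : L = ((L.toNat : Nat) : Int) := by omega
    set m := L.toNat with hmdef
    have hm : 1 ≤ m := by omega
    set T := runsToList rest with hT
    have hdrop' : List.drop pos cs = List.replicate m c ++ T := by
      rw [hdrop]; simp [runsToList, hmdef, hT]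
    have hlen : pos + m + T.length = cs.length := by
      have := congrArg List.length hdrop'
      simp at this
      omega
    have hTdrop : List.drop (pos + m) cs = T := by
      have : List.drop m (List.drop pos cs) = T := by
        rw [hdrop', List.drop_append_of_le_length (by simp), List.drop_replicate]
        simp
      rwa [List.drop_drop] at this
    have hget : ∀ j', j' < m → cs[pos + j']? = some c := by
      intro j' hj'
      have h1 : (List.drop pos cs)[j']? = some c := by
        rw [hdrop', List.getElem?_append_left (by simpa using hj')]
        simp [hj']
      rwa [List.getElem?_drop] at h1
    have hgetm : cs[pos + m]? = T.head? := by
      have h1 : (List.drop pos cs)[m]? = T.head? := by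
        rw [hdrop', List.getElem?_append_right (by simp)]
        simp [List.head?_eq_getElem?]
      rwa [List.getElem?_drop] at h1
    have hTne : ∀ dch ∈ T.head?, dch ≠ c := by
      intro dch hd
      have hhead : T.head? = rest.head?.map Prod.fst :=
        runsToList_head rest (fun p hp => hcnt p (by simp [hp]))
      rw [List.isChain_cons] at hchain
      cases hrest : rest.head? with
      | none => rw [hhead, hrest] at hd; simp at hd
      | some q =>
        rw [hhead, hrest] at hd
        simp at hd
        have hne := hchain.1 q (by simp [hrest])
        simp at hne
        subst hd
        exact fun he => hne he.symm
    have hsome : ∀ x : Char, ((some x == some '+') : Bool) = (x == '+') := fun _ => rfl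
    have hgood_in : ∀ j', j' + 1 < m → goodIdx cs (pos + j') = (c == '+') := by
      intro j' h
      unfold goodIdx
      rw [hget j' (by omega), show pos + j' + 1 = pos + (j' + 1) by omega,
        hget (j' + 1) (by omega)]
      simp only [hsome, Bool.and_self]
    have hgood_last : goodIdx cs (pos + (m - 1)) = false := by
      unfold goodIdx
      rw [hget (m - 1) (by omega), show pos + (m - 1) + 1 = pos + m by omega, hgetm]
      by_cases hc : c = '+'
      · cases hTh : T.head? with
        | none => simp
        | some dch =>
          have hne := hTne dch (by simp [hTh])
          rw [hc] at hne
          simp only [hsome, Bool.and_eq_false_iff]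
          right
          simp [hne]
      · simp only [hsome, Bool.and_eq_false_iff]
        left
        simp [hc]
    -- split the index range at the run boundary
    have hsplit : List.range' pos (cs.length - pos)
        = (List.range' pos (m - 1) ++ [pos + (m - 1)])
          ++ List.range' (pos + m) (cs.length - (pos + m)) := by
      have h1 := @List.range'_append pos (m - 1) 1 1
      simp only [one_mul, List.range'_one] at h1
      have h2 := @List.range'_append pos m (cs.length - (pos + m)) 1
      simp only [one_mul] at h2
      rw [show (m - 1) + 1 = m by omega] at h1
      rw [show m + (cs.length - (pos + m)) = cs.length - pos by omega] at h2
      rw [← h2, ← h1]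
    have hfilter_run : (List.range' pos (m - 1)).filter (goodIdx cs)
        = if c = '+' then List.range' pos (m - 1) else [] := by
      by_cases hc : c = '+'
      · rw [if_pos hc, List.filter_eq_self]
        intro j hj
        rw [List.mem_range'_1] at hj
        have hgj := hgood_in (j - pos) (by omega)
        rw [show pos + (j - pos) = j by omega] at hgj
        simp [hgj, hc]
      · rw [if_neg hc, List.filter_eq_nil_iff]
        intro j hj
        rw [List.mem_range'_1] at hj
        have hgj := hgood_in (j - pos) (by omega)
        rw [show pos + (j - pos) = j by omega] at hgj
        simp [hgj, hc]
    -- the one step of the outer fold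
    rw [List.foldl_cons]
    have hcast : (pos : Int) + L = (((pos + m : Nat) : Nat) : Int) := by
      push_cast; omega
    by_cases hc : c = '+'
    · -- inner loop produces exactly the run's emitted strings
      have hstep2 : stage2Step cs (res, (pos : Int)) (c, L)
          = (res ++ (List.range' pos (m - 1)).map (emitAt cs), (((pos + m : Nat) : Nat) : Int)) := by
        simp only [stage2Step, if_pos hc]
        rw [PySem.List.foldl_append_singleton_eq_map, hcast]
        congr 1
        rw [PySem.List.pyRange_one, List.range'_eq_map_range, List.map_map, List.map_map]
        rw [show ((L : Int) - 1 - 0).toNat = m - 1 by omega]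
        congr 1
        apply List.map_congr_left
        intro k hk
        rw [List.mem_range] at hk
        simp only [Function.comp_apply]
        have e1 : PySem.List.slice cs none (some ((pos : Nat) : Int)) = List.take pos cs :=
          PySem.List.slice_to_natCast cs pos
        have e2 : PySem.List.slice cs (some (((pos + m : Nat) : Nat) : Int)) none
            = List.drop (pos + m) cs := PySem.List.slice_from_natCast cs (pos + m)
        have e3 : PySem.List.pyRepeat ['+'] ((0 : Int) + (k : Int)) = List.replicate k '+' := by
          rw [PySem.List.pyRepeat_singleton]
          congr 1
          omega
        have e4 : PySem.List.pyRepeat ['+'] (L - ((0 : Int) + (k : Int)) - 2)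
            = List.replicate (m - k - 2) '+' := by
          rw [PySem.List.pyRepeat_singleton]
          congr 1
          omega
        rw [e1, e2, e3, e4]
        unfold emitAt
        have htake : List.take (pos + k) cs = List.take pos cs ++ List.replicate k '+' := by
          rw [List.take_add, hdrop', List.take_append_of_le_length (by simp; omega),
            List.take_replicate, show min k m = k by omega, hc]
        have hdrop2 : List.drop (pos + k + 2) cs = List.replicate (m - k - 2) '+' ++ T := by
          have h5 : List.drop (k + 2) (List.drop pos cs)
              = List.replicate (m - k - 2) '+' ++ T := by
            rw [hdrop', List.drop_append_of_le_length (by simp; omega), List.drop_replicate, hc]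
            rw [Nat.sub_sub]
          rw [List.drop_drop] at h5
          rw [show pos + k + 2 = pos + (k + 2) by omega]
          exact h5
        rw [htake, hdrop2, hTdrop]
        simp
      rw [hstep2]
      rw [List.isChain_cons] at hchain
      rw [ih (pos + m) _ (by omega) hTdrop (fun p hp => hcnt p (by simp [hp])) hchain.2]
      rw [hsplit, List.filter_append, List.filter_append, List.map_append, hfilter_run, if_pos hc]
      rw [show List.filter (goodIdx cs) [pos + (m - 1)] = [] by simp [hgood_last]]
      simp
    · have hstep2 : stage2Step cs (res, (pos : Int)) (c, L)
          = (res, (((pos + m : Nat) : Nat) : Int)) := by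
        simp only [stage2Step, if_neg hc]
        rw [hcast]
      rw [hstep2]
      rw [List.isChain_cons] at hchain
      rw [ih (pos + m) _ (by omega) hTdrop (fun p hp => hcnt p (by simp [hp])) hchain.2]
      rw [hsplit, List.filter_append, List.filter_append, List.map_append, hfilter_run, if_neg hc]
      rw [show List.filter (goodIdx cs) [pos + (m - 1)] = [] by simp [hgood_last]]
      simp

lemma B_eq_spec (s : String) : generatePossibleNextMoves_alt s = pairsSpec s.toList := by
  unfold generatePossibleNextMoves_alt
  cases hl : s.toList with
  | nil => simp [pairsSpec]
  | cons d t =>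
    simp only
    rw [rle_eq d t]
    have hB := lemB_loop (d :: t) (rleF d 1 t) 0 [] (by omega)
      (by rw [List.drop_zero, rleF_flat t d 1 (by omega)]; simp)
      (rleF_pos t d 1 (by omega)) (rleF_chain t d 1)
    simp only [Nat.cast_zero] at hB
    rw [hB]
    unfold pairsSpec
    rw [List.range_eq_range']
    simp

-- ===== VERDICT (by name: the statement is the Claim_ definition above) =====
theorem generatePossibleNextMoves_spec : Claim_equal_generatePossibleNextMoves := by
  intro s _
  show _ = _
  rw [A_eq_spec, B_eq_spec]
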